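-- pv_equiv track=rewrite | github.com/Severag/Advent_of_Code_2022 | Day 6/day_6.py | solve_old
-- ===== SOURCE A (Python) =====
-- def solve_old(data, is_part1=True):
--     from collections import Counter
--     '''
--     use of counter came from:
--     https://www.geeksforgeeks.org/python-program-to-check-if-a-string-contains-all-unique-characters/
--     '''
--     word = data[0]
--     win_len = (4 if is_part1 else 14) - 1
--
--     for idx, char in enumerate(word[win_len:], start=win_len):
--         window = word[idx - win_len:idx+1]
--         freq = Counter(window)  # dictionary of characters and their counts in word
--         if len(freq) == len(window):  # if every character has a single entry in freq
--             return idx + 1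
-- ===== SOURCE B (Python) =====
-- def solve_old(data, is_part1=True):
--     # Single-pass sliding window: `win` is the longest duplicate-free run of
--     # characters ending at the current position; a duplicate drops the prefix
--     # of `win` up to (and including) the earlier occurrence.
--     k = 4 if is_part1 else 14
--     win = []
--     for i, char in enumerate(data[0]):
--         if char in win:
--             del win[:win.index(char) + 1]
--         win.append(char)
--         if len(win) == k:
--             return i + 1
-- ===== Notes on version B (the rewrite author's own statement) =====
-- stated objective: alternative
-- what changed: Replaces A's per-index window rebuild (slice + Counter + distinctness check for every position) with a single-pass sliding window that keeps the longest duplicate-free run ending at the current character, dropping the prefix up to an earlier occurrence on a duplicate; same measured cost on random inputs.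
-- outside the precondition, e.g. on solve_old([], True): A raises IndexError, B raises IndexError
import Mathlib
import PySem

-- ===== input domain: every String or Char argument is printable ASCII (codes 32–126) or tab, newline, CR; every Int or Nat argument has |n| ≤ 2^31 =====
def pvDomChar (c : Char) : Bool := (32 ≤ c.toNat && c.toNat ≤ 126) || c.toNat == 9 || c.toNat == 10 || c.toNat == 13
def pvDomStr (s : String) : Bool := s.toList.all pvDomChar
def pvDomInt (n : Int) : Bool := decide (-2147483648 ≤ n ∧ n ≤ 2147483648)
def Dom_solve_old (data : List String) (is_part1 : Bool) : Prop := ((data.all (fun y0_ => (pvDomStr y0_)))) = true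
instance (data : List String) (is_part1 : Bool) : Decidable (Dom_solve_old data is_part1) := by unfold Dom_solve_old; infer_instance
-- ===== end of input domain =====

-- B replaces A's per-window Counter recheck with a single-pass sliding window
-- (longest duplicate-free run ending at the current position); equal return values on Pre_.

-- ===== PORT A =====
def solveOldLoop (w : List Char) (winLen : Int) : List (Int × Char) → Option Int
  | [] => none
  | (idx, _) :: rest =>
    let window := PySem.List.slice w (some (idx - winLen)) (some (idx + 1))
    let freq := PySem.Dict.counter window
    if freq.size = window.length then some (idx + 1)
    else solveOldLoop w winLen rest

def solve_old (data : List String) (is_part1 : Bool) : Option Int :=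
  match PySem.List.pyGet? data 0 with
  | none => none  -- data[0] raises IndexError: excluded by Pre_
  | some word =>
    let w := word.toList
    let winLen : Int := (if is_part1 then 4 else 14) - 1
    solveOldLoop w winLen (PySem.List.enumerate (PySem.List.slice w (some winLen) none) winLen)

-- ===== PORT B =====
def solveAltLoop (k : Nat) : List (Int × Char) → List Char → Option Int
  | [], _ => none
  | (i, c) :: rest, win =>
    -- if char in win: del win[:win.index(char)+1]  (index? is guarded by the membership test)
    let win1 := if win.contains c then win.drop (((PySem.List.index? win c).getD 0) + 1) else win
    let win2 := win1 ++ [c]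
    if win2.length = k then some (i + 1) else solveAltLoop k rest win2

def solve_old_alt (data : List String) (is_part1 : Bool) : Option Int :=
  match PySem.List.pyGet? data 0 with
  | none => none  -- data[0] raises IndexError: excluded by Pre_
  | some word =>
    let k := if is_part1 then 4 else 14
    solveAltLoop k (PySem.List.enumerate word.toList 0) []

-- ===== PRECONDITION & SPEC =====
-- Pre_ excludes only the empty list, on which A (and B) raise IndexError at data[0].
def Pre_solve_old (data : List String) (is_part1 : Bool) : Prop := data ≠ []
instance (data : List String) (is_part1 : Bool) : Decidable (Pre_solve_old data is_part1) := by unfold Pre_solve_old; infer_instance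
def pvWitness_solve_old : List String × Bool := (["abcaefgh"], true)
def Spec_solve_old (data : List String) (is_part1 : Bool) (out : Option Int) : Prop := out = solve_old_alt data is_part1
instance (data : List String) (is_part1 : Bool) (out : Option Int) : Decidable (Spec_solve_old data is_part1 out) := by unfold Spec_solve_old; infer_instance

-- ===== CLAIM (what is proved, stated in full; the proofs are below) =====
def Claim_equal_solve_old : Prop := ∀ (data : List String) (is_part1 : Bool), Dom_solve_old data is_part1 → Pre_solve_old data is_part1 → Spec_solve_old data is_part1 (solve_old data is_part1)

-- ===== LEMMAS AND PROOFS =====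

-- the window of character positions [s, i) of l
def pvWin (l : List Char) (s i : Nat) : List Char := (l.drop s).take (i - s)

lemma pvWin_shift (l : List Char) {s s' : Nat} (i : Nat) (h : s ≤ s') :
    pvWin l s' i = (pvWin l s i).drop (s' - s) := by
  unfold pvWin
  rw [List.drop_take, List.drop_drop]
  have e1 : i - s - (s' - s) = i - s' := by omega
  have e2 : s + (s' - s) = s' := by omega
  rw [e1, e2]
lemma pvWin_getElem (l : List Char) {s i p : Nat} (hi : i ≤ l.length) (hp : p < i - s) :
    (pvWin l s i)[p]'(by unfold pvWin; simp; omega) = l[s+p]'(by omega) := by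
  unfold pvWin
  rw [List.getElem_take, List.getElem_drop]
lemma pvWin_succ (l : List Char) {s i : Nat} (hs : s ≤ i) (hi : i < l.length) :
    pvWin l s (i+1) = pvWin l s i ++ [l[i]] := by
  unfold pvWin
  have h1 : i + 1 - s = (i - s) + 1 := by omega
  have h2 : s + (i - s) = i := by omega
  rw [h1, List.take_add_one]
  congr 1
  have : (l.drop s)[i-s]? = some l[i] := by
    rw [List.getElem?_drop, h2, List.getElem?_eq_getElem hi]
  simp [this]
lemma pvWin_not_nodup_of_dup (l : List Char) {s i p q : Nat}
    (hi : i ≤ l.length) (hpq : p < q) (hq : q < i - s)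
    (heq : l[s+p]'(by omega) = l[s+q]'(by omega)) :
    ¬ (pvWin l s i).Nodup := by
  intro hnd
  have hlen : (pvWin l s i).length = i - s := by unfold pvWin; simp; omega
  have h1 := pvWin_getElem l hi (show p < i - s by omega)
  have h2 := pvWin_getElem l hi hq
  have hp' : p < (pvWin l s i).length := by omega
  have hq' : q < (pvWin l s i).length := by omega
  have : p = q := by
    rw [← hnd.getElem_inj_iff (hi := hp') (hj := hq'), h1, h2]; exact heq
  omega
lemma pvWin_mono_not_nodup (l : List Char) {s i : Nat}
    (h : ¬ (pvWin l s i).Nodup) : ¬ (pvWin l s (i+1)).Nodup := by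
  intro hnd
  apply h
  have : pvWin l s i = (pvWin l s (i+1)).take (i - s) := by
    unfold pvWin
    rw [List.take_take]
    congr 1; omega
  rw [this]
  exact hnd.sublist (List.take_sublist _ _)

lemma pvWin_getElem? (l : List Char) {s i p : Nat} (hi : i ≤ l.length) (hp : p < i - s) :
    (pvWin l s i)[p]? = l[s+p]? := by
  have h1 : p < (pvWin l s i).length := by unfold pvWin; simp; omega
  have h2 : s + p < l.length := by omega
  rw [List.getElem?_eq_getElem h1, List.getElem?_eq_getElem h2, pvWin_getElem l hi hp]

lemma pvWin_not_nodup_of_dup? (l : List Char) {s i p q : Nat}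
    (hi : i ≤ l.length) (hpq : p < q) (hq : q < i - s)
    (heq : l[s+p]? = l[s+q]?) :
    ¬ (pvWin l s i).Nodup := by
  apply pvWin_not_nodup_of_dup l hi hpq hq
  have h1 : s + p < l.length := by omega
  have h2 : s + q < l.length := by omega
  rw [List.getElem?_eq_getElem h1, List.getElem?_eq_getElem h2] at heq
  exact Option.some.inj heq

lemma pvUpdate_len (xs : List Char) : ∀ s : List Char,
    ((PySem.Set.update s xs).length = s.length + xs.length ↔ (xs.Nodup ∧ ∀ x ∈ xs, x ∉ s))
    ∧ (PySem.Set.update s xs).length ≤ s.length + xs.length := by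
  induction xs with
  | nil => intro s; simp [PySem.Set.update]
  | cons x xs ih =>
    intro s
    have hstep : PySem.Set.update s (x :: xs) = PySem.Set.update (PySem.Set.add s x) xs := by
      simp [PySem.Set.update]
    by_cases hx : x ∈ s
    · rw [hstep, PySem.Set.add_of_mem hx]
      refine ⟨?_, by have := (ih s).2; simp; omega⟩
      constructor
      · intro h; exfalso; have := (ih s).2; simp at h; omega
      · rintro ⟨-, h⟩; exact absurd hx (h x (by simp))
    · rw [hstep, PySem.Set.add_of_not_mem hx]
      have h2 := (ih (s ++ [x])).2
      have h1 := (ih (s ++ [x])).1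
      have hsl : (s ++ [x]).length = s.length + 1 := by simp
      have hcl : (x :: xs).length = xs.length + 1 := by simp
      rw [hsl] at h1 h2
      rw [hcl]
      refine ⟨?_, by omega⟩
      constructor
      · intro h
        obtain ⟨hnd, hall⟩ := h1.mp (by omega)
        refine ⟨List.nodup_cons.mpr ⟨?_, hnd⟩, ?_⟩
        · intro hxx
          exact (hall x hxx) (by simp)
        · intro y hy
          rcases List.mem_cons.mp hy with rfl | hy
          · exact hx
          · intro hys
            exact (hall y hy) (by simp [hys])
      · rintro ⟨hnd, hall⟩
        have : xs.Nodup ∧ ∀ y ∈ xs, y ∉ s ++ [x] := by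
          refine ⟨(List.nodup_cons.mp hnd).2, ?_⟩
          intro y hy
          simp only [List.mem_append, List.mem_singleton]
          push_neg
          refine ⟨hall y (by simp [hy]), ?_⟩
          rintro rfl
          exact (List.nodup_cons.mp hnd).1 hy
        have := h1.mpr this
        omega

lemma pvCounter_size (xs : List Char) :
    ((PySem.Dict.counter xs).size = xs.length ↔ xs.Nodup) := by
  have hsize : (PySem.Dict.counter xs).size = (PySem.Set.ofList xs).length := by
    show (PySem.Dict.counter xs).items.length = _
    rw [PySem.Dict.items_counter]
    simp
  have hof : PySem.Set.ofList xs = PySem.Set.update [] xs := by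
    simp [PySem.Set.update, PySem.Set.ofList]
  have h := pvUpdate_len xs []
  rw [hsize, hof]
  simp only [List.length_nil, Nat.zero_add] at h
  rw [h.1]
  constructor
  · exact fun h => h.1
  · exact fun h => ⟨h, by simp⟩


lemma pvLoopA (l : List Char) (k : Nat) (hk : 1 ≤ k) :
    ∀ (t : List Char) (m : Nat), t = l.drop m → k-1 ≤ m →
    solveOldLoop l ((k:Int)-1) (PySem.List.enumerate t (m:Int)) =
      ((List.range' m (l.length - m)).find?
        (fun j => decide (pvWin l (j+1-k) (j+1)).Nodup)).map (fun j => (j:Int)+1) := by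
  intro t
  induction t with
  | nil =>
    intro m ht _
    have : l.length ≤ m := by
      have := congrArg List.length ht; simp at this; omega
    have hz : l.length - m = 0 := by omega
    rw [hz]
    simp [PySem.List.enumerate, solveOldLoop]
  | cons c t' ih =>
    intro m ht hm
    have hml : m < l.length := by
      have := congrArg List.length ht; simp at this; omega
    have ht' : t' = l.drop (m+1) := by
      have h := congrArg List.tail ht
      simpa [List.tail_drop] using h
    have hc : l[m] = c := by
      have h := congrArg (fun xs => xs[0]?) ht
      simp [List.getElem?_drop, List.getElem?_eq_getElem hml] at h
      exact h.symm
    have hrange : List.range' m (l.length - m) = m :: List.range' (m+1) (l.length - (m+1)) := by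
      have : l.length - m = (l.length - (m+1)) + 1 := by omega
      rw [this, List.range'_succ]
    rw [PySem.List.enumerate_cons, hrange]
    show (let window := PySem.List.slice l (some ((m:Int) - ((k:Int)-1))) (some ((m:Int) + 1));
          let freq := PySem.Dict.counter window;
          if freq.size = window.length then some ((m:Int) + 1)
          else solveOldLoop l ((k:Int)-1) (PySem.List.enumerate t' ((m:Int)+1))) = _
    have hwin : PySem.List.slice l (some ((m:Int) - ((k:Int)-1))) (some ((m:Int) + 1))
        = pvWin l (m+1-k) (m+1) := by
      have e1 : (m:Int) - ((k:Int)-1) = ((m+1-k : Nat) : Int) := by push_cast; omega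
      have e2 : (m:Int) + 1 = ((m+1 : Nat) : Int) := by push_cast; ring
      rw [e1, e2, PySem.List.slice_natCast]
      rfl
    simp only [hwin, List.find?_cons]
    by_cases hnd : (pvWin l (m+1-k) (m+1)).Nodup
    · have hsz : (PySem.Dict.counter (pvWin l (m+1-k) (m+1))).size = (pvWin l (m+1-k) (m+1)).length :=
        (pvCounter_size _).mpr hnd
      simp [hsz, hnd]
    · have hsz : ¬ (PySem.Dict.counter (pvWin l (m+1-k) (m+1))).size = (pvWin l (m+1-k) (m+1)).length := by
        intro h; exact hnd ((pvCounter_size _).mp h)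
      simp only [hsz, if_false]
      have e3 : (m:Int) + 1 = ((m+1 : Nat) : Int) := by push_cast; ring
      rw [e3, ih (m+1) ht' (by omega)]
      have hd : decide (pvWin l (m+1-k) (m+1)).Nodup = false := by simpa using hnd
      rw [hd]

lemma pvWin_length (l : List Char) {s i : Nat} (hs : s ≤ i) (hi : i ≤ l.length) :
    (pvWin l s i).length = i - s := by unfold pvWin; simp; omega

lemma not_mem_drop_of_nodup {xs : List Char} (h : xs.Nodup) {j : Nat} (hj : j < xs.length) :
    xs[j] ∉ xs.drop (j+1) := by
  intro hmem
  obtain ⟨p, hp, hpe⟩ := List.mem_iff_getElem.mp hmem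
  rw [List.getElem_drop] at hpe
  have : j + 1 + p = j := h.getElem_inj_iff.mp hpe
  omega

lemma pvLoopB (l : List Char) (k : Nat) (hk : 1 ≤ k) :
    ∀ (t : List Char) (i start : Nat) (win : List Char),
      t = l.drop i → start ≤ i → i ≤ l.length →
      win = pvWin l start i →
      (∀ s, s ≤ i → ((pvWin l s i).Nodup ↔ start ≤ s)) →
      i - start ≤ k - 1 →
    solveAltLoop k (PySem.List.enumerate t (i:Int)) win =
      ((List.range' i (l.length - i)).find?
        (fun j => decide ((k-1 ≤ j) ∧ (pvWin l (j+1-k) (j+1)).Nodup))).map (fun j => (j:Int)+1) := by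
  intro t
  induction t with
  | nil =>
    intro i start win ht _ hil _ _ _
    have : l.length ≤ i := by
      have := congrArg List.length ht; simp at this; omega
    have hz : l.length - i = 0 := by omega
    rw [hz]
    simp [PySem.List.enumerate, solveAltLoop]
  | cons c t' ih =>
    intro i start win ht hsi hil hwin hinv hbound
    have hil' : i < l.length := by
      have := congrArg List.length ht; simp at this; omega
    have ht' : t' = l.drop (i+1) := by
      have h := congrArg List.tail ht; simpa [List.tail_drop] using h
    have hc : l[i] = c := by
      have h := congrArg (fun xs => xs[0]?) ht
      simp [List.getElem?_drop, List.getElem?_eq_getElem hil'] at h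
      exact h.symm
    have hlen : win.length = i - start := by rw [hwin]; exact pvWin_length l hsi (by omega)
    have hnodup : win.Nodup := by rw [hwin]; exact (hinv start hsi).mpr le_rfl
    -- the new state
    by_cases hmem : c ∈ win
    case pos =>
      -- duplicate: drop through the earlier occurrence of c
      obtain ⟨j, hidx⟩ : ∃ j, PySem.List.index? win c = some j := by
        have := PySem.List.index?_isSome_iff (xs := win) (v := c)
        rcases h : PySem.List.index? win c with _ | j
        · rw [h] at this; simp at this; exact absurd hmem (by simpa using this)
        · exact ⟨j, rfl⟩
      obtain ⟨hjlt, hje, -⟩ := PySem.List.getElem_of_index?_eq_some hidx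
      have hjw : j < i - start := by omega
      have hlsj : l[start + j]? = some c := by
        rw [← pvWin_getElem? l (s := start) (i := i) (by omega) hjw, ← hwin,
          List.getElem?_eq_getElem hjlt, hje]
      have hstart' : start + j + 1 ≤ i := by omega
      have hwin1 : win.drop (j+1) = pvWin l (start+j+1) i := by
        rw [pvWin_shift l (s := start) i (by omega), ← hwin]
        congr 1; omega
      have hnd1 : (win.drop (j+1)).Nodup := hnodup.sublist (List.drop_sublist _ _)
      have hcnot : c ∉ win.drop (j+1) := by
        have h := not_mem_drop_of_nodup hnodup hjlt
        rwa [hje] at h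
      have hwin2 : win.drop (j+1) ++ [c] = pvWin l (start+j+1) (i+1) := by
        rw [pvWin_succ l (by omega) hil', ← hwin1]
        simp [hc]
      have hnd2 : (win.drop (j+1) ++ [c]).Nodup := by
        simp only [List.nodup_append, List.nodup_cons, List.not_mem_nil, not_false_iff,
          List.nodup_nil, and_true, true_and]
        refine ⟨hnd1, ?_⟩
        intro a ha
        intro b hb
        simp only [List.mem_singleton] at hb
        subst hb
        intro hac
        exact hcnot (hac ▸ ha)
      have hinv' : ∀ s, s ≤ i+1 → ((pvWin l s (i+1)).Nodup ↔ start+j+1 ≤ s) := by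
        intro s hs
        constructor
        · intro hnd
          by_contra hlt
          push Not at hlt
          by_cases hss : s < start
          · exact (pvWin_mono_not_nodup l (fun h => by
              have := (hinv s (by omega)).mp h; omega)) hnd
          · -- start ≤ s < start+j+1 : positions start+j and i both carry c
            have hp : start + j - s < i - s := by omega
            exact (pvWin_not_nodup_of_dup? l (s := s) (i := i+1)
              (by omega) (p := start + j - s) (q := i - s) (by omega) (by omega)
              (by
                have e1 : s + (start + j - s) = start + j := by omega
                have e2 : s + (i - s) = i := by omega
                rw [e1, e2, List.getElem?_eq_getElem hil', hc]
                exact hlsj)) hnd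
        · intro hge
          have : pvWin l s (i+1) = (pvWin l (start+j+1) (i+1)).drop (s - (start+j+1)) :=
            pvWin_shift l (i+1) hge
          rw [this, ← hwin2]
          exact hnd2.sublist (List.drop_sublist _ _)
      -- step the program
      rw [PySem.List.enumerate_cons]
      have hidx' : List.idxOf? c win = some j := by
        rw [← PySem.List.index?_eq_idxOf?]; exact hidx
      simp only [solveAltLoop, List.contains_eq_mem, hmem, decide_true,
        PySem.List.index?_eq_idxOf?, hidx', Option.getD_some, if_pos]
      have hlen2 : (win.drop (j+1) ++ [c]).length = i - start - j := by
        simp [hlen]; omega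
      have hnotk : ¬ ((win.drop (j+1) ++ [c]).length = k) := by
        rw [hlen2]; omega
      rw [if_neg hnotk]
      -- the spec's head predicate is false at i
      have hrange : List.range' i (l.length - i) = i :: List.range' (i+1) (l.length - (i+1)) := by
        have : l.length - i = (l.length - (i+1)) + 1 := by omega
        rw [this, List.range'_succ]
      rw [hrange, List.find?_cons]
      have hpred : ¬ ((k-1 ≤ i) ∧ (pvWin l (i+1-k) (i+1)).Nodup) := by
        rintro ⟨hki, hgood⟩
        have := (hinv' (i+1-k) (by omega)).mp hgood
        omega
      have hd : decide ((k-1 ≤ i) ∧ (pvWin l (i+1-k) (i+1)).Nodup) = false := by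
        simpa using hpred
      rw [hd]
      have e3 : (i:Int) + 1 = ((i+1 : Nat) : Int) := by push_cast; ring
      rw [e3]
      exact ih (i+1) (start+j+1) _ ht' (by omega) (by omega) hwin2 hinv' (by omega)
    case neg =>
      have hwin2 : win ++ [c] = pvWin l start (i+1) := by
        rw [pvWin_succ l hsi hil', ← hwin]
        simp [hc]
      have hnd2 : (win ++ [c]).Nodup := by
        simp only [List.nodup_append, List.nodup_cons, List.not_mem_nil, not_false_iff,
          List.nodup_nil, and_true, true_and]
        refine ⟨hnodup, ?_⟩
        intro a ha
        intro b hb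
        simp only [List.mem_singleton] at hb
        subst hb
        intro hac
        exact hmem (hac ▸ ha)
      have hinv' : ∀ s, s ≤ i+1 → ((pvWin l s (i+1)).Nodup ↔ start ≤ s) := by
        intro s hs
        constructor
        · intro hnd
          by_contra hlt
          push Not at hlt
          exact (pvWin_mono_not_nodup l (fun h => by
            have := (hinv s (by omega)).mp h; omega)) hnd
        · intro hge
          have : pvWin l s (i+1) = (pvWin l start (i+1)).drop (s - start) :=
            pvWin_shift l (i+1) hge
          rw [this, ← hwin2]
          exact hnd2.sublist (List.drop_sublist _ _)
      rw [PySem.List.enumerate_cons]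
      have hcont : win.contains c = false := by simp [hmem]
      simp only [solveAltLoop, hcont, Bool.false_eq_true, if_false]
      have hlen2 : (win ++ [c]).length = i + 1 - start := by simp [hlen]; omega
      have hrange : List.range' i (l.length - i) = i :: List.range' (i+1) (l.length - (i+1)) := by
        have : l.length - i = (l.length - (i+1)) + 1 := by omega
        rw [this, List.range'_succ]
      rw [hrange, List.find?_cons]
      have hfire : ((win ++ [c]).length = k) ↔ ((k-1 ≤ i) ∧ (pvWin l (i+1-k) (i+1)).Nodup) := by
        rw [hlen2]
        constructor
        · intro hke
          refine ⟨by omega, ?_⟩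
          have : pvWin l (i+1-k) (i+1) = pvWin l start (i+1) := by congr 1; omega
          rw [this, ← hwin2]; exact hnd2
        · rintro ⟨hki, hgood⟩
          have := (hinv' (i+1-k) (by omega)).mp hgood
          omega
      by_cases hke : (win ++ [c]).length = k
      · rw [if_pos hke]
        have hd : decide ((k-1 ≤ i) ∧ (pvWin l (i+1-k) (i+1)).Nodup) = true := by
          simpa using hfire.mp hke
        rw [hd]
        simp
      · rw [if_neg hke]
        have hd : decide ((k-1 ≤ i) ∧ (pvWin l (i+1-k) (i+1)).Nodup) = false := by
          simpa using (fun h => hke (hfire.mpr h))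
        rw [hd]
        have e3 : (i:Int) + 1 = ((i+1 : Nat) : Int) := by push_cast; ring
        rw [e3]
        exact ih (i+1) start _ ht' (by omega) (by omega) hwin2 hinv' (by omega)



lemma find?_drop_guard (k : Nat) (P : Nat → Prop) [DecidablePred P] :
    ∀ xs : List Nat, (∀ j ∈ xs, k-1 ≤ j) →
      xs.find? (fun j => decide ((k-1 ≤ j) ∧ P j)) = xs.find? (fun j => decide (P j)) := by
  intro xs
  induction xs with
  | nil => intro _; rfl
  | cons x xs ih =>
    intro h
    rw [List.find?_cons, List.find?_cons]
    have hx : k - 1 ≤ x := h x (by simp)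
    by_cases hp : P x
    · rw [decide_eq_true (by exact ⟨hx, hp⟩), decide_eq_true hp]
    · rw [decide_eq_false (by rintro ⟨-, h2⟩; exact hp h2), decide_eq_false hp]
      exact ih (fun j hj => h j (by simp [hj]))

lemma pvFindEq' (n : Nat) (k : Nat) (hk : 1 ≤ k) (P : Nat → Prop) [DecidablePred P] :
    ((List.range' (k-1) (n - (k-1))).find? (fun j => decide (P j))).map (fun j => ((j:Int)+1)) =
    ((List.range' 0 n).find? (fun j => decide ((k-1 ≤ j) ∧ P j))).map (fun j => ((j:Int)+1)) := by
  by_cases hn : n ≤ k-1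
  · have h1 : n - (k-1) = 0 := by omega
    rw [h1]
    have h2 : (List.range' 0 n).find? (fun j => decide ((k-1 ≤ j) ∧ P j)) = none := by
      apply List.find?_eq_none.mpr
      intro x hx
      have : x < n := by have := List.mem_range'_1.mp hx; omega
      simp only [decide_eq_true_eq]
      rintro ⟨h3, -⟩; omega
    rw [h2]
    rfl
  · have hsplit : List.range' 0 (k-1) ++ List.range' (k-1) (n-(k-1)) = List.range' 0 n := by
      have h := List.range'_append (s := 0) (m := k-1) (n := n-(k-1)) (step := 1)
      simp only [Nat.one_mul, Nat.zero_add] at h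
      rw [h]
      congr 1; omega
    rw [← hsplit, List.find?_append]
    have h2 : (List.range' 0 (k-1)).find? (fun j => decide ((k-1 ≤ j) ∧ P j)) = none := by
      apply List.find?_eq_none.mpr
      intro x hx
      have : x < k-1 := by have := List.mem_range'_1.mp hx; omega
      simp only [decide_eq_true_eq]
      rintro ⟨h3, -⟩; omega
    rw [h2, Option.none_or]
    rw [find?_drop_guard k P _ (fun j hj => by have := List.mem_range'_1.mp hj; omega)]


lemma pvMain (l : List Char) (k : Nat) (hk : 1 ≤ k) :
    solveOldLoop l ((k:Int)-1) (PySem.List.enumerate (l.drop (k-1)) (((k-1 : Nat)) : Int)) =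
    solveAltLoop k (PySem.List.enumerate l 0) [] := by
  rw [pvLoopA l k hk (l.drop (k-1)) (k-1) rfl le_rfl]
  have h0 : (0 : Int) = ((0 : Nat) : Int) := rfl
  rw [h0, pvLoopB l k hk l 0 0 [] (by simp) le_rfl (Nat.zero_le _)
    (by simp [pvWin])
    (by intro s hs; have : s = 0 := by omega
        subst this; simp [pvWin])
    (by omega)]
  have := pvFindEq' l.length k hk (fun j => (pvWin l (j+1-k) (j+1)).Nodup)
  simpa using this

-- ===== VERDICT (by name: the statement is the Claim_ definition above) =====
theorem solve_old_spec : Claim_equal_solve_old := by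
  unfold Claim_equal_solve_old
  intro data is_part1 _ hpre
  unfold Spec_solve_old
  match data, hpre with
  | w :: rest, _ =>
    show solve_old (w :: rest) is_part1 = solve_old_alt (w :: rest) is_part1
    unfold solve_old solve_old_alt
    have hget : PySem.List.pyGet? (w :: rest) 0 = some w := by
      rw [PySem.List.pyGet?_zero]; rfl
    rw [hget]
    cases is_part1
    · have h := pvMain w.toList 14 (by norm_num)
      have hs : PySem.List.slice w.toList (some ((14:Int) - 1)) none = w.toList.drop 13 := by
        rw [show ((14:Int) - 1) = ((13:Nat):Int) by norm_num, PySem.List.slice_from_natCast]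
      simp only [if_false, Bool.false_eq_true]
      rw [hs]
      exact h
    · have h := pvMain w.toList 4 (by norm_num)
      have hs : PySem.List.slice w.toList (some ((4:Int) - 1)) none = w.toList.drop 3 := by
        rw [show ((4:Int) - 1) = ((3:Nat):Int) by norm_num, PySem.List.slice_from_natCast]
      simp only [if_true]
      rw [hs]
      exact h
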